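-- pv_equiv track=rewrite | github.com/andvagorion/adventofcode | 2017/01.py | shift2
-- ===== SOURCE A (Python) =====
-- def shift2(s):
--   s2 = s[len(s)>>1:] + s[0:len(s)>>1]
--   while len(s) > 0:
--     a = s[0]
--     b = s2[0]
--     s = s[1:]
--     s2 = s2[1:]
--     yield a,b
-- ===== SOURCE B (Python) =====
-- def shift2(s):
--     n = len(s)
--     half = n >> 1
--     for i in range(n):
--         yield s[i], s[(i + half) % n]
-- ===== Notes on version B (the rewrite author's own statement) =====
-- stated objective: simpler
-- what changed: B drops the rotated auxiliary string and the list-shrinking while loop; it indexes the original string once with (i+half) % n over a single range loop.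
import Mathlib
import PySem

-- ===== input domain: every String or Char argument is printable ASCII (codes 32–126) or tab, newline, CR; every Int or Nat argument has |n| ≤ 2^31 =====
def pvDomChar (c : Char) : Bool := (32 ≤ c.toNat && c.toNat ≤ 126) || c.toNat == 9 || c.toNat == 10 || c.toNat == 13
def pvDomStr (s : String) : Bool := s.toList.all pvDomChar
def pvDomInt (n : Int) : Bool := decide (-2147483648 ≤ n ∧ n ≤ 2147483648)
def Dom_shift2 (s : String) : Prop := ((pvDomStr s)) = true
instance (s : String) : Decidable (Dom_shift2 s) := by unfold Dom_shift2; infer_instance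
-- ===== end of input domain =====

-- B replaces A's rotated copy and list-shrinking while loop by one index loop with (i+half) % n; objective: simpler.

-- ===== PORT A =====
-- the while loop: consume s and s2 in lockstep, yielding (s[0], s2[0]) each step
def shift2Go : List Char → List Char → List (String × String)
  | a :: s, b :: s2 => (String.ofList [a], String.ofList [b]) :: shift2Go s s2
  | _, _ => []

def shift2 (s : String) : List (String × String) :=
  let l := s.toList
  let h : Int := ((l.length >>> 1 : Nat) : Int)
  -- s2 = s[len(s)>>1:] + s[0:len(s)>>1]  (Python slices with nonnegative bounds)
  let s2 := PySem.List.slice l (some h) none ++ PySem.List.slice l (some 0) (some h)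
  shift2Go l s2

-- ===== PORT B =====
def shift2_alt (s : String) : List (String × String) :=
  let l := s.toList
  let n := l.length
  let half := n >>> 1
  (PySem.List.pyRange 0 (n : Int) 1).map (fun i =>
    (String.ofList [PySem.List.pyGetD l i ' '],
     String.ofList [PySem.List.pyGetD l (PySem.Int.mod (i + (half : Int)) (n : Int)) ' ']))

-- ===== PRECONDITION & SPEC =====
def Spec_shift2 (s : String) (out : List (String × String)) : Prop := out = shift2_alt s
instance (s : String) (out : List (String × String)) : Decidable (Spec_shift2 s out) := by unfold Spec_shift2; infer_instance

-- ===== CLAIM (what is proved, stated in full; the proofs are below) =====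
def Claim_equal_shift2 : Prop := ∀ (s : String), Dom_shift2 s → Spec_shift2 s (shift2 s)

-- ===== LEMMAS AND PROOFS =====

theorem slice_drop_char (l : List Char) (h : Nat) :
    PySem.List.slice l (some (h : Int)) none = l.drop h := by simp [pysem]

theorem slice_take_char (l : List Char) (h : Nat) :
    PySem.List.slice l (some 0) (some (h : Int)) = l.take h := by simp [pysem]

theorem shift2Go_eq_zip (xs ys : List Char) (h : xs.length ≤ ys.length) :
    shift2Go xs ys = (xs.zip ys).map (fun p => (String.ofList [p.1], String.ofList [p.2])) := by
  induction xs generalizing ys with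
  | nil => simp [shift2Go]
  | cons a s ih =>
    cases ys with
    | nil => simp at h
    | cons b s2 =>
      simp only [shift2Go, List.zip_cons_cons, List.map_cons]
      exact congrArg _ (ih s2 (by simpa using h))

theorem rot_getElem (l : List Char) (h k : Nat) (hhle : h ≤ l.length) (hk : k < l.length)
    (hk' : k < (l.drop h ++ l.take h).length) :
    (l.drop h ++ l.take h)[k] = l[(k + h) % l.length]'(Nat.mod_lt _ (by omega)) := by
  by_cases hcase : k < l.length - h
  · rw [List.getElem_append_left (by simp only [List.length_drop]; omega)]
    simp only [List.getElem_drop]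
    congr 1
    rw [Nat.mod_eq_of_lt (by omega)]
    omega
  · rw [List.getElem_append_right (by simp only [List.length_drop]; omega)]
    simp only [List.getElem_take]
    congr 1
    rw [Nat.mod_eq_sub_mod (by omega), Nat.mod_eq_of_lt (by omega)]
    simp only [List.length_drop]
    omega

theorem shift2_spec_list (l : List Char) :
    shift2Go l (l.drop (l.length >>> 1) ++ l.take (l.length >>> 1)) =
    (PySem.List.pyRange 0 (l.length : Int) 1).map (fun i =>
      (String.ofList [PySem.List.pyGetD l i ' '],
       String.ofList [PySem.List.pyGetD l
         (PySem.Int.mod (i + ((l.length >>> 1 : Nat) : Int)) (l.length : Int)) ' '])) := by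
  have hhdef : l.length >>> 1 = l.length / 2 := by simp [Nat.shiftRight_eq_div_pow]
  have hhle : l.length >>> 1 ≤ l.length := by omega
  have hrot_len : (l.drop (l.length >>> 1) ++ l.take (l.length >>> 1)).length = l.length := by
    simp; omega
  rw [shift2Go_eq_zip _ _ (by omega)]
  rw [PySem.List.pyRange_one]
  simp only [Int.sub_zero, Int.toNat_natCast, List.map_map]
  apply List.ext_getElem
  · simp [hrot_len]
  · intro k hk1 hk2
    have hkn : k < l.length := by
      simp only [List.length_map, List.length_zip, hrot_len, Nat.min_self] at hk1
      exact hk1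
    simp only [List.getElem_map, List.getElem_zip, Function.comp, List.getElem_range, zero_add]
    have hmod : PySem.Int.mod ((k : Int) + ((l.length >>> 1 : Nat) : Int)) (l.length : Int)
        = (((k + (l.length >>> 1)) % l.length : Nat) : Int) := by
      exact_mod_cast PySem.Int.mod_natCast (k + (l.length >>> 1)) l.length
    have hget1 : PySem.List.pyGetD l (k : Int) ' ' = l[k] := by
      simp [List.getD_eq_getElem?_getD, hkn]
    have hmodlt : (k + (l.length >>> 1)) % l.length < l.length := Nat.mod_lt _ (by omega)
    have hget2 : PySem.List.pyGetD l (((k + (l.length >>> 1)) % l.length : Nat) : Int) ' '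
        = l[(k + (l.length >>> 1)) % l.length] := by
      rw [PySem.List.pyGetD_natCast]
      simp [List.getD_eq_getElem?_getD, hmodlt]
    rw [hmod, hget1, hget2, rot_getElem l (l.length >>> 1) k hhle hkn
      (by rw [hrot_len]; exact hkn)]

-- ===== VERDICT (by name: the statement is the Claim_ definition above) =====
theorem shift2_spec : Claim_equal_shift2 := by
  intro s _
  show shift2 s = shift2_alt s
  unfold shift2 shift2_alt
  simp only
  rw [slice_drop_char, slice_take_char]
  exact shift2_spec_list s.toList
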